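-- pv_equiv track=rewrite | github.com/posl/comment_recommendation | script/mod_gen/1_time/zh/243_D/3.py | solve
-- ===== SOURCE A (Python) =====
-- def solve(n, x, s):
--     cur = x
--     for i in range(n):
--         if s[i] == 'U':
--             cur = (cur + 1) // 2
--         elif s[i] == 'L':
--             cur *= 2
--         else:
--             cur = cur * 2 + 1
--     return cur
-- ===== SOURCE B (Python) =====
-- def solve(n, x, s):
--     # path/bit-list representation of the node index (MSB-first)
--     bits = []
--     m = x
--     while m > 0:
--         bits.append(m % 2)
--         m //= 2
--     bits.reverse()
--     for i in range(n):
--         c = s[i]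
--         if c == 'U':
--             if bits and bits[-1] == 0:
--                 bits.pop()
--             else:
--                 j = len(bits) - 1
--                 while j >= 0 and bits[j] == 1:
--                     bits[j] = 0
--                     j -= 1
--                 if j >= 0:
--                     bits[j] = 1
--                 else:
--                     bits.insert(0, 1)
--                 bits.pop()
--         elif c == 'L':
--             bits.append(0)
--         else:
--             bits.append(1)
--     r = 0
--     for b in bits:
--         r = 2 * r + b
--     return r
-- ===== Notes on version B (the rewrite author's own statement) =====
-- stated objective: alternative
-- what changed: B keeps the node as an explicit MSB-first bit list (the root-to-node path): L/R append a bit, U pops a 0-bit or increments the trailing run of 1s with carry and then pops, and the integer is rebuilt once at the end, instead of A's repeated big-integer arithmetic on a single counter.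
-- outside the precondition, e.g. on solve(1, -2, 'U'): A returns -1, B returns 0
import Mathlib
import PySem

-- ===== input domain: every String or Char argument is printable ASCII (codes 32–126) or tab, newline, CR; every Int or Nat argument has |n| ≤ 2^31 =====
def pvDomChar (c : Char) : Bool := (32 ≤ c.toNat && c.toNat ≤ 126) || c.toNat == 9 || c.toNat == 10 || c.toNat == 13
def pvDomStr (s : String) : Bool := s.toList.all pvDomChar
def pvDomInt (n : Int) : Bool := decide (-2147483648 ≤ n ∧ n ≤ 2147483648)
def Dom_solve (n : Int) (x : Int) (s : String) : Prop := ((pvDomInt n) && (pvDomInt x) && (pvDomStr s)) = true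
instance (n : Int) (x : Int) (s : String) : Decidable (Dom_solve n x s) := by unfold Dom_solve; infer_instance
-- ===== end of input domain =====

-- B replaces A's big-integer counter by an explicit MSB-first bit list (the root-to-node path);
-- equal return values are proved for nonnegative start index x and n ≤ len(s) (alternative decomposition, no speed claim).

-- ===== PORT A =====
def stepA (s : String) (cur : Int) (i : Int) : Int :=
  match PySem.List.pyGet? s.toList i with
  | some c =>
      if c = 'U' then PySem.Int.floordiv (cur + 1) 2
      else if c = 'L' then cur * 2
      else cur * 2 + 1
  | none => cur  -- Python raises IndexError here; excluded by Pre_solve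

def solve (n : Int) (x : Int) (s : String) : Int :=
  (PySem.List.pyRange 0 n 1).foldl (stepA s) x

-- ===== PORT B =====
-- while m > 0: bits.append(m % 2); m //= 2   (LSB-first accumulator, reversed by the caller)
def bitsLoop (m : Int) (acc : List Int) : List Int :=
  if h : 0 < m then bitsLoop (PySem.Int.floordiv m 2) (acc ++ [PySem.Int.mod m 2]) else acc
termination_by m.toNat
decreasing_by
  rw [PySem.Int.floordiv_eq_ediv_of_pos (by omega)]
  omega

-- the inner j-loop of Source B (turn trailing 1s into 0s, set the next bit to 1 or prepend 1),
-- written as structural recursion over the REVERSED (LSB-first) list; exact hand port.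
def incRev : List Int → List Int
  | [] => [1]
  | b :: t => if b = 1 then 0 :: incRev t else 1 :: t

def stepB (s : String) (bits : List Int) (i : Int) : List Int :=
  match PySem.List.pyGet? s.toList i with
  | some c =>
      if c = 'U' then
        if bits.getLast? = some 0 then bits.dropLast          -- "if bits and bits[-1] == 0: bits.pop()"
        else ((incRev bits.reverse).reverse).dropLast         -- carry-increment, then pop
      else if c = 'L' then bits ++ [0]
      else bits ++ [1]
  | none => bits  -- Python raises IndexError here; excluded by Pre_solve

def solve_alt (n : Int) (x : Int) (s : String) : Int :=
  ((PySem.List.pyRange 0 n 1).foldl (stepB s) ((bitsLoop x []).reverse)).foldl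
    (fun r b => 2 * r + b) 0

-- ===== PRECONDITION & SPEC =====
-- Pre_ excludes negative start indices x (tree node indices are nonnegative; B's bit-list
-- representation does not encode negatives, on which A returns negative values) and the
-- inputs n > len(s) on which A raises IndexError.
def Pre_solve (n : Int) (x : Int) (s : String) : Prop :=
  0 ≤ x ∧ n ≤ (s.toList.length : Int)
instance (n : Int) (x : Int) (s : String) : Decidable (Pre_solve n x s) := by
  unfold Pre_solve; infer_instance

def pvWitness_solve : Int × Int × String := (3, 2, "URL")

def Spec_solve (n : Int) (x : Int) (s : String) (out : Int) : Prop := out = solve_alt n x s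
instance (n : Int) (x : Int) (s : String) (out : Int) : Decidable (Spec_solve n x s out) := by
  unfold Spec_solve; infer_instance

-- ===== CLAIM (what is proved, stated in full; the proofs are below) =====
def Claim_equal_solve : Prop :=
  ∀ (n : Int) (x : Int) (s : String), Dom_solve n x s → Pre_solve n x s →
    Spec_solve n x s (solve n x s)

-- ===== LEMMAS AND PROOFS =====

/-- value of an MSB-first bit list, exactly Source B's final reconstruction fold -/
def pvVal (l : List Int) : Int := l.foldl (fun r b => 2 * r + b) 0

/-- value of an LSB-first bit list -/
def pvValL : List Int → Int
  | [] => 0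
  | b :: t => b + 2 * pvValL t

def pvIsBin (l : List Int) : Prop := ∀ b ∈ l, b = 0 ∨ b = 1

theorem pvVal_append (l : List Int) (b : Int) : pvVal (l ++ [b]) = 2 * pvVal l + b := by
  simp [pvVal, List.foldl_append]

theorem pvVal_reverse (l : List Int) : pvVal l.reverse = pvValL l := by
  induction l with
  | nil => simp [pvVal, pvValL]
  | cons b t ih => simp [List.reverse_cons, pvVal_append, pvValL, ih]; ring

theorem pvValL_incRev (l : List Int) (hb : pvIsBin l) : pvValL (incRev l) = pvValL l + 1 := by
  induction l with
  | nil => simp [incRev, pvValL]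
  | cons b t ih =>
      rcases hb b (by simp) with h0 | h1
      · subst h0; simp [incRev, pvValL]; ring
      · subst h1
        have ht : pvIsBin t := fun c hc => hb c (by simp [hc])
        simp [incRev, pvValL, ih ht]; ring

theorem pvIsBin_incRev (l : List Int) (hb : pvIsBin l) : pvIsBin (incRev l) := by
  induction l with
  | nil => intro c hc; simp [incRev] at hc; simp [hc]
  | cons b t ih =>
      intro c hc
      by_cases h : b = 1
      · subst h; simp only [incRev, if_pos rfl] at hc
        rcases List.mem_cons.mp hc with h | h
        · simp [h]
        · exact ih (fun d hd => hb d (by simp [hd])) c h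
      · simp only [incRev, if_neg h] at hc
        rcases List.mem_cons.mp hc with h | h
        · simp [h]
        · exact hb c (by simp [h])

theorem pvIsBin_reverse (l : List Int) (hb : pvIsBin l) : pvIsBin l.reverse := by
  intro c hc; exact hb c (List.mem_reverse.mp hc)

theorem pvIsBin_dropLast (l : List Int) (hb : pvIsBin l) : pvIsBin l.dropLast := by
  intro c hc; exact hb c (List.mem_of_mem_dropLast hc)

theorem pvIsBin_stepB (s : String) (l : List Int) (i : Int) (hb : pvIsBin l) :
    pvIsBin (stepB s l i) := by
  unfold stepB
  cases PySem.List.pyGet? s.toList i with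
  | none => exact hb
  | some c =>
      by_cases hU : c = 'U'
      · simp only [if_pos hU]
        by_cases h0 : l.getLast? = some 0
        · simp only [if_pos h0]; exact pvIsBin_dropLast _ hb
        · simp only [if_neg h0]
          exact pvIsBin_dropLast _ (pvIsBin_reverse _ (pvIsBin_incRev _ (pvIsBin_reverse _ hb)))
      · by_cases hL : c = 'L'
        · simp only [if_neg hU, if_pos hL]
          intro d hd
          rcases List.mem_append.mp hd with h | h
          · exact hb d h
          · simp at h; simp [h]
        · simp only [if_neg hU, if_neg hL]
          intro d hd
          rcases List.mem_append.mp hd with h | h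
          · exact hb d h
          · simp at h; simp [h]

theorem pvVal_stepB (s : String) (l : List Int) (i : Int) (hb : pvIsBin l) :
    pvVal (stepB s l i) = stepA s (pvVal l) i := by
  unfold stepB stepA
  cases PySem.List.pyGet? s.toList i with
  | none => rfl
  | some c =>
      by_cases hU : c = 'U'
      · simp only [if_pos hU]
        rw [PySem.Int.floordiv_eq_ediv_of_pos (by omega : (0:Int) < 2)]
        by_cases h0 : l.getLast? = some 0
        · simp only [if_pos h0]
          have hne : l ≠ [] := by intro h; subst h; simp at h0
          have hconc : l.dropLast ++ [0] = l := by
            have h1 := List.dropLast_concat_getLast hne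
            have hlast : l.getLast hne = 0 := by
              have h2 := List.getLast?_eq_some_getLast (l := l) hne
              rw [h2] at h0
              exact Option.some.inj h0
            rw [hlast] at h1
            simpa using h1
          have hv : pvVal (l.dropLast ++ [0]) = 2 * pvVal l.dropLast + 0 := pvVal_append _ _
          rw [hconc] at hv
          omega
        · simp only [if_neg h0]
          rcases List.eq_nil_or_concat l with hnil | ⟨d, b, hc⟩
          · subst hnil
            simp [incRev, pvVal, pvValL]
          · subst hc
            rw [List.concat_eq_append] at hb h0 ⊢
            have hb1 : b = 1 := by
              rcases hb b (by simp) with h | h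
              · exfalso; apply h0; simp [List.getLast?_concat, h]
              · exact h
            subst hb1
            have hrev : (d ++ [1]).reverse = 1 :: d.reverse := by simp
            have hinc : incRev ((d ++ [1]).reverse) = 0 :: incRev d.reverse := by
              rw [hrev]; simp [incRev]
            have hpop : ((0 : Int) :: incRev d.reverse).reverse.dropLast
                = (incRev d.reverse).reverse := by
              simp [List.reverse_cons]
            rw [hinc, hpop, pvVal_reverse, pvValL_incRev _ (pvIsBin_reverse _ (fun c hc => hb c (by simp [hc])))]
            rw [pvVal_append]
            have : pvValL d.reverse = pvVal d := by rw [← pvVal_reverse, List.reverse_reverse]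
            omega
      · by_cases hL : c = 'L'
        · simp only [if_neg hU, if_pos hL, pvVal_append]; ring
        · simp only [if_neg hU, if_neg hL, pvVal_append]; ring

theorem pvFold_eq (s : String) (idxs : List Int) (l : List Int) (hb : pvIsBin l) :
    idxs.foldl (stepA s) (pvVal l) = pvVal (idxs.foldl (stepB s) l) := by
  induction idxs generalizing l with
  | nil => rfl
  | cons i t ih =>
      simp only [List.foldl_cons]
      rw [← pvVal_stepB s l i hb]
      exact ih _ (pvIsBin_stepB s l i hb)

theorem pvBitsLoopAux : ∀ (k : Nat) (m : Int), m.toNat ≤ k → ∀ acc, bitsLoop m acc = acc ++ bitsLoop m [] := by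
  intro k
  induction k with
  | zero =>
      intro m hm acc
      have h : ¬ 0 < m := by omega
      rw [bitsLoop.eq_def, dif_neg h, bitsLoop.eq_def, dif_neg h]
      simp
  | succ k ih =>
      intro m hm acc
      by_cases h : 0 < m
      · have hd : (PySem.Int.floordiv m 2).toNat ≤ k := by
          rw [PySem.Int.floordiv_eq_ediv_of_pos (by omega)]
          omega
        rw [bitsLoop.eq_def, dif_pos h, ih _ hd]
        have h2 : bitsLoop m [] = [PySem.Int.mod m 2] ++ bitsLoop (PySem.Int.floordiv m 2) [] := by
          rw [bitsLoop.eq_def, dif_pos h, ih _ hd]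
          simp
        rw [h2]
        simp
      · rw [bitsLoop.eq_def, dif_neg h, bitsLoop.eq_def, dif_neg h]
        simp

theorem pvBitsLoop_append (m : Int) (acc : List Int) :
    bitsLoop m acc = acc ++ bitsLoop m [] :=
  pvBitsLoopAux m.toNat m le_rfl acc

theorem pvBitsLoopValAux : ∀ (k : Nat) (m : Int), m.toNat ≤ k → 0 ≤ m → pvValL (bitsLoop m []) = m := by
  intro k
  induction k with
  | zero =>
      intro m hm hm0
      have h : ¬ 0 < m := by omega
      rw [bitsLoop.eq_def, dif_neg h]
      simp only [pvValL]
      omega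
  | succ k ih =>
      intro m hm hm0
      by_cases h : 0 < m
      · have hdiv : PySem.Int.floordiv m 2 = m / 2 := PySem.Int.floordiv_eq_ediv_of_pos (by omega)
        have hmod : PySem.Int.mod m 2 = m % 2 := PySem.Int.mod_eq_emod_of_pos (by omega)
        rw [bitsLoop.eq_def, dif_pos h, pvBitsLoop_append]
        simp only [List.nil_append, List.cons_append, pvValL, List.singleton_append]
        rw [ih _ (by rw [hdiv]; omega) (by rw [hdiv]; omega)]
        rw [hdiv, hmod]
        omega
      · rw [bitsLoop.eq_def, dif_neg h]
        simp only [pvValL]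
        omega

theorem pvBitsLoop_val (m : Int) (hm : 0 ≤ m) : pvValL (bitsLoop m []) = m :=
  pvBitsLoopValAux m.toNat m le_rfl hm

theorem pvBitsLoopBinAux : ∀ (k : Nat) (m : Int), m.toNat ≤ k → pvIsBin (bitsLoop m []) := by
  intro k
  induction k with
  | zero =>
      intro m hm
      have h : ¬ 0 < m := by omega
      rw [bitsLoop.eq_def, dif_neg h]
      intro b hbm
      simp at hbm
  | succ k ih =>
      intro m hm
      by_cases h : 0 < m
      · rw [bitsLoop.eq_def, dif_pos h, pvBitsLoop_append]
        intro b hbm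
        rcases List.mem_append.mp hbm with hA | hB
        · simp at hA
          rw [hA]
          omega
        · have hd : (PySem.Int.floordiv m 2).toNat ≤ k := by
            rw [PySem.Int.floordiv_eq_ediv_of_pos (by omega)]
            omega
          exact ih _ hd b hB
      · rw [bitsLoop.eq_def, dif_neg h]
        intro b hbm
        simp at hbm

theorem pvBitsLoop_bin (m : Int) : pvIsBin (bitsLoop m []) :=
  pvBitsLoopBinAux m.toNat m le_rfl

-- ===== VERDICT (by name: the statement is the Claim_ definition above) =====
theorem solve_spec : Claim_equal_solve := by
  intro n x s _hdom hpre
  unfold Spec_solve solve solve_alt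
  have hbin : pvIsBin ((bitsLoop x []).reverse) := pvIsBin_reverse _ (pvBitsLoop_bin x)
  have hval : pvVal ((bitsLoop x []).reverse) = x := by
    rw [pvVal_reverse]; exact pvBitsLoop_val x hpre.1
  have := pvFold_eq s (PySem.List.pyRange 0 n 1) ((bitsLoop x []).reverse) hbin
  rw [hval] at this
  exact this
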